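-- pv_equiv track=rewrite | github.com/aiyuekuang/vidpilot | scripts/generate-audio-chattts.py | _num_to_chinese
-- ===== SOURCE A (Python) =====
-- def _int_to_chinese(n):
--     """整数转中文读法（0~9999）"""
--     digits = '零一二三四五六七八九'
--     if n == 0:
--         return '零'
--     result = ''
--     if n >= 1000:
--         result += digits[n // 1000] + '千'
--         n %= 1000
--         if 0 < n < 100:
--             result += '零'
--     if n >= 100:
--         result += digits[n // 100] + '百'
--         n %= 100
--         if 0 < n < 10:
--             result += '零'
--     if n >= 10:
--         # "十几" 而不是 "一十几"（仅独立使用时）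
--         if n // 10 == 1 and not result:
--             result += '十'
--         else:
--             result += digits[n // 10] + '十'
--         n %= 10
--     if n > 0:
--         result += digits[n]
--     return result
--
-- def _num_to_chinese(num_str):
--     """数字字符串转中文（支持小数）"""
--     digits_map = '零一二三四五六七八九'
--     if '.' in num_str:
--         integer_part, decimal_part = num_str.split('.', 1)
--         cn_int = _int_to_chinese(int(integer_part)) if integer_part else '零'
--         cn_dec = ''.join(digits_map[int(d)] for d in decimal_part)
--         return f"{cn_int}点{cn_dec}"
--     return _int_to_chinese(int(num_str))
-- ===== SOURCE B (Python) =====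
-- def _int_to_chinese(n):
--     """整数转中文读法（0~9999）——先抽出低位到高位的数字表，再倒着拼接"""
--     digits = '零一二三四五六七八九'
--     units = ('', '十', '百', '千')
--     if n == 0:
--         return '零'
--     if n < 0:
--         return ''
--     ds = []
--     while n > 0:
--         ds.append(n % 10)
--         n //= 10
--     out = ''
--     gap = False
--     for pos, d in enumerate(ds):
--         if d == 0:
--             if out:
--                 gap = True
--             continue
--         if d == 1 and pos == 1 and pos == len(ds) - 1:
--             piece = '十'
--         else:
--             piece = digits[d] + units[pos]
--         out = piece + ('零' if gap else '') + out
--         gap = False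
--     return out
--
-- def _num_to_chinese(num_str):
--     """数字字符串转中文（支持小数）"""
--     if '.' not in num_str:
--         return _int_to_chinese(int(num_str))
--     integer_part, decimal_part = num_str.split('.', 1)
--     cn_int = _int_to_chinese(int(integer_part)) if integer_part else '零'
--     return cn_int + '点' + ''.join('零一二三四五六七八九'[int(d)] for d in decimal_part)
-- ===== Notes on version B (the rewrite author's own statement) =====
-- stated objective: alternative
-- what changed: Instead of A's high-to-low place-value branches that divide, emit and look ahead for zero gaps, B first extracts the digit list low-to-high with a divmod loop and then builds the reading back-to-front in a single pass over the enumerated digits, prepending each piece and flushing one pending-gap flag.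
import Mathlib
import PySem

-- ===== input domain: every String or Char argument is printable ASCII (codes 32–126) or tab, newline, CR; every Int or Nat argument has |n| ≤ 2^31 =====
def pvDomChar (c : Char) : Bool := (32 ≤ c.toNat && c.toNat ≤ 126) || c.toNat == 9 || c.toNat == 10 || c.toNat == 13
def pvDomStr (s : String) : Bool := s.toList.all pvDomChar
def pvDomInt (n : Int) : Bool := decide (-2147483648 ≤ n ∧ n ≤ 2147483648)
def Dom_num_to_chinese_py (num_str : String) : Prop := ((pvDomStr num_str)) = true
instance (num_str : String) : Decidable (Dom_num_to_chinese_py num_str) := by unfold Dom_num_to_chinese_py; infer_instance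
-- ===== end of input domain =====

-- B converts the integer the opposite way round: it first extracts the digit list low-to-high,
-- then builds the reading back-to-front in one pass with a gap flag (objective: alternative, same
-- cost); Pre_ excludes exactly the inputs where Python A raises (unparsable parts, value ≥ 10000).

-- ===== PORT A =====
def pvDigits : List Char := ['零','一','二','三','四','五','六','七','八','九']

-- port of _int_to_chinese (A): four unrolled branches; digits[d] for d ≥ 10 raises in Python
-- (IndexError), those inputs are excluded by Pre_ below, so pyGetD's default is never reached there.
def int_to_chinese_py (n : Int) : List Char :=
  if n = 0 then ['零'] else
  let result : List Char := []
  let (result, n) :=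
    if n ≥ 1000 then
      let result := result ++ [PySem.List.pyGetD pvDigits (PySem.Int.floordiv n 1000) '零'] ++ ['千']
      let n := PySem.Int.mod n 1000
      let result := if 0 < n ∧ n < 100 then result ++ ['零'] else result
      (result, n)
    else (result, n)
  let (result, n) :=
    if n ≥ 100 then
      let result := result ++ [PySem.List.pyGetD pvDigits (PySem.Int.floordiv n 100) '零'] ++ ['百']
      let n := PySem.Int.mod n 100
      let result := if 0 < n ∧ n < 10 then result ++ ['零'] else result
      (result, n)
    else (result, n)
  let (result, n) :=
    if n ≥ 10 then
      let result :=
        if PySem.Int.floordiv n 10 = 1 ∧ result = [] then result ++ ['十']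
        else result ++ [PySem.List.pyGetD pvDigits (PySem.Int.floordiv n 10) '零'] ++ ['十']
      (result, PySem.Int.mod n 10)
    else (result, n)
  if n > 0 then result ++ [PySem.List.pyGetD pvDigits n '零'] else result

-- port of _num_to_chinese (A); int(s) = PySem.Int.ofChars? (none = ValueError, excluded by Pre_)
def num_to_chinese_py (num_str : String) : String :=
  let cs := num_str.toList
  if cs.contains '.' then
    let parts := PySem.Chars.splitOnMax cs ['.'] 1
    let ip := parts.getD 0 []
    let dp := parts.getD 1 []
    let cnInt := if ip ≠ [] then int_to_chinese_py ((PySem.Int.ofChars? ip).getD 0) else ['零']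
    let cnDec := dp.map (fun d => PySem.List.pyGetD pvDigits ((PySem.Int.ofChars? [d]).getD 0) '零')
    String.ofList (cnInt ++ ['点'] ++ cnDec)
  else String.ofList (int_to_chinese_py ((PySem.Int.ofChars? cs).getD 0))

-- ===== PORT B =====
def pvUnits : List (List Char) := [[], ['十'], ['百'], ['千']]

-- B's while-loop 'while n > 0: ds.append(n % 10); n //= 10' (digit list, low to high)
def pvDigsLoop (n : Int) : List Int :=
  if h : 0 < n then
    PySem.Int.mod n 10 :: pvDigsLoop (PySem.Int.floordiv n 10)
  else []
termination_by n.toNat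
decreasing_by
  have := PySem.Int.floordiv_eq_ediv_of_pos (a := n) (b := 10) (by norm_num)
  rw [this]; omega

-- B's 'for pos, d in enumerate(ds)' body: state (out, gap); units[pos] for pos ≥ 4 raises in
-- Python (IndexError, only for values ≥ 10000, excluded by Pre_), so pyGetD's default is unreached.
def pvJoinStep (L : Int) (st : List Char × Bool) (pd : Int × Int) : List Char × Bool :=
  let (out, gap) := st
  let (pos, d) := pd
  if d = 0 then
    if out ≠ [] then (out, true) else (out, gap)
  else
    let piece :=
      if d = 1 ∧ pos = 1 ∧ pos = L - 1 then ['十']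
      else [PySem.List.pyGetD pvDigits d '零'] ++ PySem.List.pyGetD pvUnits pos []
    (piece ++ (if gap then ['零'] else []) ++ out, false)

-- port of B's _int_to_chinese: extract digits, then one back-to-front join pass
def int_to_chinese_alt (n : Int) : List Char :=
  if n = 0 then ['零'] else
  if n < 0 then [] else
  let ds := pvDigsLoop n
  ((PySem.List.enumerate ds 0).foldl (pvJoinStep (PySem.List.len ds)) ([], false)).1

-- port of B's _num_to_chinese (guard inverted, direct concatenation, as in Source B)
def num_to_chinese_py_alt (num_str : String) : String :=
  let cs := num_str.toList
  if ¬ cs.contains '.' then String.ofList (int_to_chinese_alt ((PySem.Int.ofChars? cs).getD 0))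
  else
    let parts := PySem.Chars.splitOnMax cs ['.'] 1
    let ip := parts.getD 0 []
    let dp := parts.getD 1 []
    let cnInt := if ip ≠ [] then int_to_chinese_alt ((PySem.Int.ofChars? ip).getD 0) else ['零']
    String.ofList (cnInt ++ ['点'] ++
      dp.map (fun d => PySem.List.pyGetD pvDigits ((PySem.Int.ofChars? [d]).getD 0) '零'))

-- ===== PRECONDITION & SPEC =====
-- Pre_ admits exactly the inputs on which Python A returns: every int() call parses and the
-- integer value is < 10000 (otherwise digits[d] with d ≥ 10 raises IndexError; negatives return '').
def pvPreCheck (num_str : String) : Bool :=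
  let cs := num_str.toList
  if cs.contains '.' then
    let parts := PySem.Chars.splitOnMax cs ['.'] 1
    parts.length == 2 &&
    (parts.getD 0 [] == [] || (PySem.Int.ofChars? (parts.getD 0 [])).getD 10000 < 10000) &&
    (parts.getD 1 []).all (fun d => (PySem.Int.ofChars? [d]).isSome)
  else (PySem.Int.ofChars? cs).getD 10000 < 10000
def Pre_num_to_chinese_py (num_str : String) : Prop := pvPreCheck num_str = true
instance (num_str : String) : Decidable (Pre_num_to_chinese_py num_str) := by
  unfold Pre_num_to_chinese_py; infer_instance

def pvWitness_num_to_chinese_py : String := "1203.05"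

def Spec_num_to_chinese_py (num_str : String) (out : String) : Prop := out = num_to_chinese_py_alt num_str
instance (num_str : String) (out : String) : Decidable (Spec_num_to_chinese_py num_str out) := by
  unfold Spec_num_to_chinese_py; infer_instance

-- ===== CLAIM (what is proved, stated in full; the proofs are below) =====
def Claim_equal_num_to_chinese_py : Prop := ∀ (num_str : String), Dom_num_to_chinese_py num_str → Pre_num_to_chinese_py num_str → Spec_num_to_chinese_py num_str (num_to_chinese_py num_str)

-- ===== LEMMAS AND PROOFS =====
set_option maxHeartbeats 1000000

lemma digsLoop_pos (n : Int) (h : 0 < n) :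
    pvDigsLoop n = PySem.Int.mod n 10 :: pvDigsLoop (PySem.Int.floordiv n 10) := by
  rw [pvDigsLoop]; simp [h]

lemma digsLoop_zero : pvDigsLoop 0 = [] := by rw [pvDigsLoop]; simp

lemma F10 (a : Int) : PySem.Int.floordiv a 10 = a / 10 :=
  PySem.Int.floordiv_eq_ediv_of_pos (by norm_num)
lemma F100 (a : Int) : PySem.Int.floordiv a 100 = a / 100 :=
  PySem.Int.floordiv_eq_ediv_of_pos (by norm_num)
lemma F1000 (a : Int) : PySem.Int.floordiv a 1000 = a / 1000 :=
  PySem.Int.floordiv_eq_ediv_of_pos (by norm_num)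
lemma M10 (a : Int) : PySem.Int.mod a 10 = a % 10 :=
  PySem.Int.mod_eq_emod_of_pos (by norm_num)
lemma M100 (a : Int) : PySem.Int.mod a 100 = a % 100 :=
  PySem.Int.mod_eq_emod_of_pos (by norm_num)
lemma M1000 (a : Int) : PySem.Int.mod a 1000 = a % 1000 :=
  PySem.Int.mod_eq_emod_of_pos (by norm_num)

lemma u0 : PySem.List.pyGetD pvUnits 0 [] = [] := by rfl
lemma u1 : PySem.List.pyGetD pvUnits 1 [] = ['十'] := by rfl
lemma u2 : PySem.List.pyGetD pvUnits 2 [] = ['百'] := by rfl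
lemma u3 : PySem.List.pyGetD pvUnits 3 [] = ['千'] := by rfl

lemma case1 (n : Int) (h1 : 0 < n) (h2 : n < 10) : int_to_chinese_py n = int_to_chinese_alt n := by
  have e1 : pvDigsLoop n = [n % 10] := by
    rw [digsLoop_pos n h1, M10, F10]
    have z : n / 10 = 0 := by omega
    rw [z, digsLoop_zero]
  have r0 : n % 10 = n := by omega
  have hn0 : ¬ n = 0 := by omega
  have hu : ¬ n % 10 = 0 := by omega
  simp [int_to_chinese_py, int_to_chinese_alt, e1, pvJoinStep,
    PySem.List.enumerate_cons, PySem.List.enumerate_nil, PySem.List.len_eq,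
    F10, F100, F1000, M10, M100, M1000, u0, u1, u2, u3, r0, hn0, hu,
    show ¬ 1000 ≤ n by omega, show ¬ 100 ≤ n by omega, show ¬ 10 ≤ n by omega, h1,
    show ¬ n < 0 by omega]

lemma case2 (n : Int) (h1 : 10 ≤ n) (h2 : n < 100) : int_to_chinese_py n = int_to_chinese_alt n := by
  have e1 : pvDigsLoop n = [n % 10, n / 10] := by
    rw [digsLoop_pos n (by omega), M10, F10, digsLoop_pos (n/10) (by omega), M10, F10]
    have h3 : n / 10 % 10 = n / 10 := by omega
    have h4 : n / 10 / 10 = 0 := by omega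
    rw [h3, h4, digsLoop_zero]
  have hn0 : ¬ n = 0 := by omega
  have ht : ¬ n / 10 = 0 := by omega
  have q6 : (0 < n % 10) ↔ ¬(n % 10 = 0) := by omega
  by_cases h5 : n / 10 = 1 <;> by_cases hu : n % 10 = 0 <;>
    simp [int_to_chinese_py, int_to_chinese_alt, e1, pvJoinStep,
      PySem.List.enumerate_cons, PySem.List.enumerate_nil, PySem.List.len_eq,
      F10, F100, F1000, M10, M100, M1000, u0, u1, u2, u3, hn0, ht, q6, h5, hu,
      show ¬ 1000 ≤ n by omega, show ¬ 100 ≤ n by omega, h1, show ¬ n < 0 by omega]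


lemma case3 (n : Int) (h1 : 100 ≤ n) (h2 : n < 1000) : int_to_chinese_py n = int_to_chinese_alt n := by
  have e1 : pvDigsLoop n = [n % 10, n % 100 / 10, n / 100] := by
    rw [digsLoop_pos n (by omega), M10, F10, digsLoop_pos (n/10) (by omega), M10, F10,
        digsLoop_pos (n/10/10) (by omega), M10, F10]
    have a1 : n / 10 % 10 = n % 100 / 10 := by omega
    have a2 : n / 10 / 10 % 10 = n / 100 := by omega
    have z : n / 10 / 10 / 10 = 0 := by omega
    rw [a1, a2, z, digsLoop_zero]
  have hn0 : ¬ n = 0 := by omega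
  have hh : ¬ n / 100 = 0 := by omega
  have r2 : n % 100 % 10 = n % 10 := by omega
  by_cases ht : n % 100 / 10 = 0 <;> by_cases hu : n % 10 = 0
  · simp [int_to_chinese_py, int_to_chinese_alt, e1, pvJoinStep,
      PySem.List.enumerate_cons, PySem.List.enumerate_nil, PySem.List.len_eq,
      F10, F100, F1000, M10, M100, M1000, u0, u1, u2, u3, hn0, hh, r2, ht, hu,
      show ¬ 1000 ≤ n by omega, h1, show ¬ n < 0 by omega,
      show ¬ (0 < n % 100 ∧ n % 100 < 10) by omega, show ¬ 10 ≤ n % 100 by omega,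
      show ¬ 0 < n % 100 by omega]
  · have r4 : n % 100 = n % 10 := by omega
    simp [int_to_chinese_py, int_to_chinese_alt, e1, pvJoinStep,
      PySem.List.enumerate_cons, PySem.List.enumerate_nil, PySem.List.len_eq,
      F10, F100, F1000, M10, M100, M1000, u0, u1, u2, u3, hn0, hh, r2, r4, ht, hu, show n % 10 / 10 = 0 by omega,
      show ¬ 1000 ≤ n by omega, h1, show ¬ n < 0 by omega,
      show 0 < n % 10 ∧ n % 10 < 10 by omega, show ¬ 10 ≤ n % 10 by omega,
      show 0 < n % 10 by omega]
  · simp [int_to_chinese_py, int_to_chinese_alt, e1, pvJoinStep,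
      PySem.List.enumerate_cons, PySem.List.enumerate_nil, PySem.List.len_eq,
      F10, F100, F1000, M10, M100, M1000, u0, u1, u2, u3, hn0, hh, r2, ht, hu,
      show ¬ 1000 ≤ n by omega, h1, show ¬ n < 0 by omega,
      show ¬ (0 < n % 100 ∧ n % 100 < 10) by omega, show 10 ≤ n % 100 by omega,
      show ¬ 0 < n % 10 by omega]
  · simp [int_to_chinese_py, int_to_chinese_alt, e1, pvJoinStep,
      PySem.List.enumerate_cons, PySem.List.enumerate_nil, PySem.List.len_eq,
      F10, F100, F1000, M10, M100, M1000, u0, u1, u2, u3, hn0, hh, r2, ht, hu,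
      show ¬ 1000 ≤ n by omega, h1, show ¬ n < 0 by omega,
      show ¬ (0 < n % 100 ∧ n % 100 < 10) by omega, show 10 ≤ n % 100 by omega,
      show 0 < n % 10 by omega]

lemma case4 (n : Int) (h1 : 1000 ≤ n) (h2 : n < 10000) : int_to_chinese_py n = int_to_chinese_alt n := by
  have e1 : pvDigsLoop n = [n % 10, n % 100 / 10, n % 1000 / 100, n / 1000] := by
    rw [digsLoop_pos n (by omega), M10, F10, digsLoop_pos (n/10) (by omega), M10, F10,
        digsLoop_pos (n/10/10) (by omega), M10, F10,
        digsLoop_pos (n/10/10/10) (by omega), M10, F10]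
    have a1 : n / 10 % 10 = n % 100 / 10 := by omega
    have a2 : n / 10 / 10 % 10 = n % 1000 / 100 := by omega
    have a3 : n / 10 / 10 / 10 % 10 = n / 1000 := by omega
    have z : n / 10 / 10 / 10 / 10 = 0 := by omega
    rw [a1, a2, a3, z, digsLoop_zero]
  have hn0 : ¬ n = 0 := by omega
  have hth : ¬ n / 1000 = 0 := by omega
  have r1 : n % 1000 % 100 = n % 100 := by omega
  have r2 : n % 100 % 10 = n % 10 := by omega
  by_cases hh : n % 1000 / 100 = 0
  · by_cases ht : n % 100 / 10 = 0 <;> by_cases hu : n % 10 = 0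
    · -- n % 1000 = 0
      simp [int_to_chinese_py, int_to_chinese_alt, e1, pvJoinStep,
        PySem.List.enumerate_cons, PySem.List.enumerate_nil, PySem.List.len_eq,
        F10, F100, F1000, M10, M100, M1000, u0, u1, u2, u3, hn0, hth, r1, r2, hh, ht, hu,
        h1, show ¬ n < 0 by omega,
        show ¬ (0 < n % 1000 ∧ n % 1000 < 100) by omega, show ¬ 100 ≤ n % 1000 by omega,
        show ¬ 10 ≤ n % 1000 by omega, show ¬ 0 < n % 1000 by omega]
    · -- n % 1000 = n % 10 ∈ 1..9
      have r5 : n % 1000 = n % 10 := by omega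
      simp [int_to_chinese_py, int_to_chinese_alt, e1, pvJoinStep,
        PySem.List.enumerate_cons, PySem.List.enumerate_nil, PySem.List.len_eq,
        F10, F100, F1000, M10, M100, M1000, u0, u1, u2, u3, hn0, hth, r1, r2, r5, hh, ht, hu,
        h1, show ¬ n < 0 by omega,
        show 0 < n % 10 ∧ n % 10 < 100 by omega, show ¬ 100 ≤ n % 10 by omega,
        show n % 10 / 100 = 0 by omega, show n % 10 / 10 = 0 by omega,
        show ¬ 10 ≤ n % 10 by omega, show 0 < n % 10 by omega]
    · -- n % 1000 = n % 100 ∈ 10..99, unit zero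
      have r5 : n % 1000 = n % 100 := by omega
      simp [int_to_chinese_py, int_to_chinese_alt, e1, pvJoinStep,
        PySem.List.enumerate_cons, PySem.List.enumerate_nil, PySem.List.len_eq,
        F10, F100, F1000, M10, M100, M1000, u0, u1, u2, u3, hn0, hth, r1, r2, r5, hh, ht, hu,
        h1, show ¬ n < 0 by omega,
        show 0 < n % 100 ∧ n % 100 < 100 by omega, show ¬ 100 ≤ n % 100 by omega,
        show n % 100 / 100 = 0 by omega,
        show 10 ≤ n % 100 by omega, show ¬ 0 < n % 10 by omega]
    · -- n % 1000 = n % 100 ∈ 10..99, unit nonzero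
      have r5 : n % 1000 = n % 100 := by omega
      simp [int_to_chinese_py, int_to_chinese_alt, e1, pvJoinStep,
        PySem.List.enumerate_cons, PySem.List.enumerate_nil, PySem.List.len_eq,
        F10, F100, F1000, M10, M100, M1000, u0, u1, u2, u3, hn0, hth, r1, r2, r5, hh, ht, hu,
        h1, show ¬ n < 0 by omega,
        show 0 < n % 100 ∧ n % 100 < 100 by omega, show ¬ 100 ≤ n % 100 by omega,
        show n % 100 / 100 = 0 by omega,
        show 10 ≤ n % 100 by omega, show 0 < n % 10 by omega]
  · by_cases ht : n % 100 / 10 = 0 <;> by_cases hu : n % 10 = 0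
    · -- hundreds nonzero, n % 100 = 0
      simp [int_to_chinese_py, int_to_chinese_alt, e1, pvJoinStep,
        PySem.List.enumerate_cons, PySem.List.enumerate_nil, PySem.List.len_eq,
        F10, F100, F1000, M10, M100, M1000, u0, u1, u2, u3, hn0, hth, r1, r2, hh, ht, hu,
        h1, show ¬ n < 0 by omega,
        show ¬ (0 < n % 1000 ∧ n % 1000 < 100) by omega, show 100 ≤ n % 1000 by omega,
        show ¬ (0 < n % 100 ∧ n % 100 < 10) by omega, show ¬ 10 ≤ n % 100 by omega,
        show ¬ 0 < n % 100 by omega]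
    · -- hundreds nonzero, n % 100 = n % 10 ∈ 1..9
      have r4 : n % 100 = n % 10 := by omega
      simp [int_to_chinese_py, int_to_chinese_alt, e1, pvJoinStep,
        PySem.List.enumerate_cons, PySem.List.enumerate_nil, PySem.List.len_eq,
        F10, F100, F1000, M10, M100, M1000, u0, u1, u2, u3, hn0, hth, r1, r2, r4, hh, ht, hu, show n % 10 / 10 = 0 by omega,
        h1, show ¬ n < 0 by omega,
        show ¬ (0 < n % 1000 ∧ n % 1000 < 100) by omega, show 100 ≤ n % 1000 by omega,
        show 0 < n % 10 ∧ n % 10 < 10 by omega, show ¬ 10 ≤ n % 10 by omega,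
        show 0 < n % 10 by omega]
    · -- hundreds and tens nonzero, unit zero
      simp [int_to_chinese_py, int_to_chinese_alt, e1, pvJoinStep,
        PySem.List.enumerate_cons, PySem.List.enumerate_nil, PySem.List.len_eq,
        F10, F100, F1000, M10, M100, M1000, u0, u1, u2, u3, hn0, hth, r1, r2, hh, ht, hu,
        h1, show ¬ n < 0 by omega,
        show ¬ (0 < n % 1000 ∧ n % 1000 < 100) by omega, show 100 ≤ n % 1000 by omega,
        show ¬ (0 < n % 100 ∧ n % 100 < 10) by omega, show 10 ≤ n % 100 by omega,
        show ¬ 0 < n % 10 by omega]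
    · -- hundreds, tens, unit all nonzero
      simp [int_to_chinese_py, int_to_chinese_alt, e1, pvJoinStep,
        PySem.List.enumerate_cons, PySem.List.enumerate_nil, PySem.List.len_eq,
        F10, F100, F1000, M10, M100, M1000, u0, u1, u2, u3, hn0, hth, r1, r2, hh, ht, hu,
        h1, show ¬ n < 0 by omega,
        show ¬ (0 < n % 1000 ∧ n % 1000 < 100) by omega, show 100 ≤ n % 1000 by omega,
        show ¬ (0 < n % 100 ∧ n % 100 < 10) by omega, show 10 ≤ n % 100 by omega,
        show 0 < n % 10 by omega]

theorem int_core (n : Int) (hlt : n < 10000) : int_to_chinese_py n = int_to_chinese_alt n := by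
  rcases lt_trichotomy n 0 with hn | hn | hn
  · have hn0 : ¬ n = 0 := by omega
    simp [int_to_chinese_py, int_to_chinese_alt, hn0, hn, show ¬ 1000 ≤ n by omega,
      show ¬ 100 ≤ n by omega, show ¬ 10 ≤ n by omega, show ¬ 0 < n by omega]
  · subst hn; simp [int_to_chinese_py, int_to_chinese_alt]
  · by_cases c4 : 1000 ≤ n
    · exact case4 n c4 hlt
    · by_cases c3 : 100 ≤ n
      · exact case3 n c3 (by omega)
      · by_cases c2 : 10 ≤ n
        · exact case2 n c2 (by omega)
        · exact case1 n hn (by omega)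

theorem wrap_eq (s : String) (hpre : Pre_num_to_chinese_py s) :
    num_to_chinese_py s = num_to_chinese_py_alt s := by
  unfold Pre_num_to_chinese_py pvPreCheck at hpre
  by_cases h : '.' ∈ s.toList
  · have hc : s.toList.contains '.' = true := by simpa using h
    simp only [hc, if_true] at hpre
    simp only [Bool.and_eq_true, beq_iff_eq, Bool.or_eq_true, decide_eq_true_eq] at hpre
    rcases hpre with ⟨⟨hlen, hbound⟩, hall⟩
    simp only [num_to_chinese_py, num_to_chinese_py_alt, hc, h, if_true, Bool.not_true,
      if_false]
    by_cases hip : (PySem.Chars.splitOnMax s.toList ['.'] 1)[0]?.getD [] = []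
    · simp [hip]
    · have hip' : ¬ (PySem.Chars.splitOnMax s.toList ['.'] 1).getD 0 [] = [] := by
        simpa [List.getD] using hip
      rcases hbound with hnil | hlt
      · exact absurd hnil hip'
      · simp only [List.getD] at hlt
        cases hv : PySem.Int.ofChars? ((PySem.Chars.splitOnMax s.toList ['.'] 1)[0]?.getD []) with
        | none => rw [hv] at hlt; simp at hlt
        | some v =>
          rw [hv] at hlt; simp at hlt
          simp [hip, hv, int_core v hlt]
  · have hc : s.toList.contains '.' = false := by simpa using h
    simp only [hc, Bool.false_eq_true, if_false, decide_eq_true_eq] at hpre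
    cases hv : PySem.Int.ofChars? s.toList with
    | none => rw [hv] at hpre; simp at hpre
    | some v =>
      rw [hv] at hpre; simp at hpre
      simp [num_to_chinese_py, num_to_chinese_py_alt, h, hc, hv, int_core v hpre]

theorem num_to_chinese_py_spec : Claim_equal_num_to_chinese_py := by
  intro s _ hpre
  unfold Spec_num_to_chinese_py
  exact wrap_eq s hpre
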